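-- pv_equiv track=rewrite | github.com/DongKeun2/algorithm | Programmers/Lv2/비밀 코드 해독.py | solution
-- ===== SOURCE A (Python) =====
-- from itertools import combinations
-- import math
-- from itertools import combinations
--
-- def get_comb_cnt(n, r):
--     if r < 0 or r > n: return 0
--     return math.comb(n, r)
--
-- def solution(n, q, ans):
--     def sol(selected, rejected, idx):
--         if len(selected) > 5 or idx > len(q):
--             return 0
--         if idx == len(q):
--             # 남은 숫자 중에서 5개를 채울 수 있는 조합 수 반환
--             total_remaining = n - len(selected) - len(rejected)
--             need = 5 - len(selected)
--             return get_comb_cnt(total_remaining, need)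
--
--         current_try = q[idx]
--         expected_match = ans[idx]
--
--         # selected에서 이미 일치한 숫자 수
--         matched = len(set(current_try) & set(selected))
--         if matched > expected_match:
--             return 0
--
--         # current_try에서 아직 선택되지 않고 거절도 안 된 숫자들만 필터
--         remaining = [x for x in current_try if x not in selected and x not in rejected]
--
--         # 현재 시도에서 더 뽑아야 할 숫자 수
--         needed_from_remaining = expected_match - matched
--         if needed_from_remaining > len(remaining):
--             return 0
--
--         total = 0
--
--         # remaining에서 needed_from_remaining 개수만큼 선택하는 조합을 모두 탐색
--         for combo in combinations(remaining, needed_from_remaining):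
--             new_selected = selected + list(combo)
--             new_rejected = rejected + [x for x in remaining if x not in combo]
--             total += sol(new_selected, new_rejected, idx + 1)
--
--         return total
--
--     return sol([], [], 0)
-- ===== SOURCE B (Python) =====
-- from itertools import combinations
-- import math
--
--
-- def comb_cnt(m, r):
--     if r < 0 or r > m:
--         return 0
--     return math.comb(m, r)
--
--
-- def solution(n, q, ans):
--     # Dynamic programming over a frontier of (selected, rejected) states with
--     # multiplicities: identical states produced along different query paths are
--     # merged in a dict instead of being re-expanded one path at a time.
--     states = {((), ()): 1}
--     for row, a in zip(q, ans):
--         nxt = {}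
--         for (sel, rej), cnt in states.items():
--             if len(sel) > 5:
--                 continue
--             matched = len(set(row) & set(sel))
--             if matched > a:
--                 continue
--             rem = [x for x in row if x not in sel and x not in rej]
--             need = a - matched
--             if need > len(rem):
--                 continue
--             for combo in combinations(rem, need):
--                 key = (tuple(sorted(sel + combo)),
--                        tuple(sorted(rej + tuple(x for x in rem if x not in combo))))
--                 nxt[key] = nxt.get(key, 0) + cnt
--         states = nxt
--     return sum(cnt * comb_cnt(n - len(sel) - len(rej), 5 - len(sel))
--                for (sel, rej), cnt in states.items() if len(sel) <= 5)
-- ===== Notes on version B (the rewrite author's own statement) =====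
-- stated objective: alternative
-- what changed: A's depth-first backtracking recursion over (selected, rejected, idx) is replaced by an iterative breadth-first dynamic program: a dict maps each canonical frontier state (sorted selected, sorted rejected) to its multiplicity, one dict per processed query, merging states that A's recursion re-expands once per path, and the leaf combination counts are summed once per distinct state at the end.
-- outside the precondition, e.g. on solution(7, [[1], [2]], [-1]): A returns 0, B returns 0
import Mathlib
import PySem

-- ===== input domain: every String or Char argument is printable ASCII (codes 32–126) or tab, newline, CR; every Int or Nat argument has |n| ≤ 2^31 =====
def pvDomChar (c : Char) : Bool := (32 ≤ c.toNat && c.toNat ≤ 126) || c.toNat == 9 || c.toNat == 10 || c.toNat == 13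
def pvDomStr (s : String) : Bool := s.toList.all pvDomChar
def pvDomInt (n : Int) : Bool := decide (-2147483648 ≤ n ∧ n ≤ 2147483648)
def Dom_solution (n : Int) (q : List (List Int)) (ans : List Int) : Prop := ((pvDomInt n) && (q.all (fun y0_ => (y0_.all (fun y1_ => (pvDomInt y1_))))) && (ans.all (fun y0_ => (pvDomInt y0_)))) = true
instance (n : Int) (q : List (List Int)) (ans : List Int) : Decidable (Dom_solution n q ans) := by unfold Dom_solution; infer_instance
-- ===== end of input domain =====

-- B replaces A's depth-first backtracking recursion by an iterative frontier dict keyed by the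
-- canonical (sorted selected, sorted rejected) state with multiplicities, merging identical states
-- (objective: alternative; return value only, no argument is mutated).

-- ===== PORT A =====
def get_comb_cnt (m r : Int) : Int :=
  if r < 0 ∨ r > m then 0 else (Nat.choose m.toNat r.toNat : Int)

-- A's inner 'sol(selected, rejected, idx)'; the extra Nat is fuel making the recursion structural
-- (called with fuel > len q - idx, the 0 case is never reached).
def solA (n : Int) (q : List (List Int)) (ans : List Int) : Nat → List Int → List Int → Nat → Int
  | 0, _, _, _ => 0
  | Nat.succ fuel, selected, rejected, idx =>
    if selected.length > 5 ∨ idx > q.length then 0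
    else if idx = q.length then
      get_comb_cnt (n - selected.length - rejected.length) (5 - selected.length)
    else
      let current_try := q.getD idx []
      let expected_match := ans.getD idx 0
      let matched : Int := ((PySem.Set.inter (PySem.Set.ofList current_try) (PySem.Set.ofList selected)).length : Int)
      if matched > expected_match then 0
      else
        let remaining := current_try.filter (fun x => !selected.contains x && !rejected.contains x)
        let needed := expected_match - matched
        if needed > (remaining.length : Int) then 0
        else
          (PySem.List.combinations remaining needed.toNat).foldl
            (fun total combo =>
              total + solA n q ans fuel (selected ++ combo)
                (rejected ++ remaining.filter (fun x => !combo.contains x)) (idx + 1)) 0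

def solution (n : Int) (q : List (List Int)) (ans : List Int) : Int :=
  solA n q ans (q.length + 1) [] [] 0

-- ===== PORT B =====
def comb_cnt (m r : Int) : Int :=
  if r < 0 ∨ r > m then 0 else (Nat.choose m.toNat r.toNat : Int)

-- one round of B's loop over 'zip(q, ans)': expand every frontier state by one query
def stepB (row : List Int) (a : Int) (states : PySem.Dict (List Int × List Int) Int) :
    PySem.Dict (List Int × List Int) Int :=
  states.items.foldl
    (fun nxt p =>
      if p.1.1.length > 5 then nxt
      else
        let matched : Int := ((PySem.Set.inter (PySem.Set.ofList row) (PySem.Set.ofList p.1.1)).length : Int)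
        if matched > a then nxt
        else
          let rem := row.filter (fun x => !p.1.1.contains x && !p.1.2.contains x)
          let need := a - matched
          if need > (rem.length : Int) then nxt
          else
            (PySem.List.combinations rem need.toNat).foldl
              (fun nxt combo =>
                let key := (PySem.List.sorted (p.1.1 ++ combo) (fun x => x) false,
                            PySem.List.sorted (p.1.2 ++ rem.filter (fun x => !combo.contains x)) (fun x => x) false)
                nxt.insert key (nxt.getD key 0 + p.2)) nxt)
    PySem.Dict.empty

def solution_alt (n : Int) (q : List (List Int)) (ans : List Int) : Int :=
  let states := (q.zip ans).foldl (fun st p => stepB p.1 p.2 st) (PySem.Dict.empty.insert ([], []) 1)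
  states.items.foldl
    (fun acc p =>
      if p.1.1.length ≤ 5 then
        acc + p.2 * comb_cnt (n - p.1.1.length - p.1.2.length) (5 - p.1.1.length)
      else acc) 0

-- ===== PRECONDITION & SPEC =====
-- Pre_ requires len(ans) ≥ len(q): A indexes ans[idx] for every idx < len(q) on surviving branches
-- and raises IndexError on a shorter ans; on excluded inputs where early pruning avoids that access
-- A returns 0 and B returns 0 as well.
def Pre_solution (n : Int) (q : List (List Int)) (ans : List Int) : Prop := q.length ≤ ans.length
instance (n : Int) (q : List (List Int)) (ans : List Int) : Decidable (Pre_solution n q ans) := by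
  unfold Pre_solution; infer_instance

def pvWitness_solution : Int × List (List Int) × List Int := (7, [[1, 2]], [1])

def Spec_solution (n : Int) (q : List (List Int)) (ans : List Int) (out : Int) : Prop := out = solution_alt n q ans
instance (n : Int) (q : List (List Int)) (ans : List Int) (out : Int) : Decidable (Spec_solution n q ans out) := by unfold Spec_solution; infer_instance

-- ===== CLAIM (what is proved, stated in full; the proofs are below) =====
def Claim_equal_solution : Prop := ∀ (n : Int) (q : List (List Int)) (ans : List Int), Dom_solution n q ans → Pre_solution n q ans → Spec_solution n q ans (solution n q ans)

-- ===== LEMMAS AND PROOFS =====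

-- A's recursion re-expressed structurally on the list of remaining (query, answer) pairs.
def solP (n : Int) : List (List Int × Int) → List Int → List Int → Int
  | [], selected, rejected =>
      if selected.length > 5 then 0
      else get_comb_cnt (n - selected.length - rejected.length) (5 - selected.length)
  | (row, a) :: ps, selected, rejected =>
      if selected.length > 5 then 0
      else
        let matched : Int := ((PySem.Set.inter (PySem.Set.ofList row) (PySem.Set.ofList selected)).length : Int)
        if matched > a then 0
        else
          let remaining := row.filter (fun x => !selected.contains x && !rejected.contains x)
          let needed := a - matched
          if needed > (remaining.length : Int) then 0
          else
            ((PySem.List.combinations remaining needed.toNat).map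
              (fun combo => solP n ps (selected ++ combo)
                (rejected ++ remaining.filter (fun x => !combo.contains x)))).sum

-- the canonical dict key B files a child state under
def childKey (sel rej rem combo : List Int) : List Int × List Int :=
  (PySem.List.sorted (sel ++ combo) (fun x => x) false,
   PySem.List.sorted (rej ++ rem.filter (fun x => !combo.contains x)) (fun x => x) false)

-- the body of B's outer loop, named for the proofs (stepB_eq below is rfl)
def outerF (row : List Int) (a : Int) (nxt : PySem.Dict (List Int × List Int) Int)
    (p : (List Int × List Int) × Int) : PySem.Dict (List Int × List Int) Int :=
  if p.1.1.length > 5 then nxt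
  else if ((PySem.Set.inter (PySem.Set.ofList row) (PySem.Set.ofList p.1.1)).length : Int) > a then nxt
  else if a - ((PySem.Set.inter (PySem.Set.ofList row) (PySem.Set.ofList p.1.1)).length : Int)
      > (((row.filter (fun x => !p.1.1.contains x && !p.1.2.contains x)).length : Nat) : Int) then nxt
  else
    (PySem.List.combinations (row.filter (fun x => !p.1.1.contains x && !p.1.2.contains x))
        (a - ((PySem.Set.inter (PySem.Set.ofList row) (PySem.Set.ofList p.1.1)).length : Int)).toNat).foldl
      (fun nxt combo =>
        nxt.insert (childKey p.1.1 p.1.2 (row.filter (fun x => !p.1.1.contains x && !p.1.2.contains x)) combo)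
          (nxt.getD (childKey p.1.1 p.1.2 (row.filter (fun x => !p.1.1.contains x && !p.1.2.contains x)) combo) 0 + p.2)) nxt

lemma stepB_eq (row : List Int) (a : Int) (d : PySem.Dict (List Int × List Int) Int) :
    stepB row a d = d.items.foldl (outerF row a) PySem.Dict.empty := rfl

-- weighted sum of a value function over a dict's items list
def wsum (f : List Int × List Int → Int) (l : List ((List Int × List Int) × Int)) : Int :=
  (l.map (fun p => p.2 * f p.1)).sum

lemma wsum_nil (f : List Int × List Int → Int) : wsum f [] = 0 := rfl

lemma wsum_cons (f : List Int × List Int → Int) (p : (List Int × List Int) × Int)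
    (l : List ((List Int × List Int) × Int)) : wsum f (p :: l) = p.2 * f p.1 + wsum f l := by
  simp [wsum]

lemma wsum_append (f : List Int × List Int → Int) (l t : List ((List Int × List Int) × Int)) :
    wsum f (l ++ t) = wsum f l + wsum f t := by
  simp [wsum]

lemma zip_drop_cons (q : List (List Int)) (ans : List Int) (idx : Nat)
    (h : idx < q.length) (hpre : q.length ≤ ans.length) :
    (q.zip ans).drop idx = (q.getD idx [], ans.getD idx 0) :: (q.zip ans).drop (idx + 1) := by
  have hl : (q.zip ans).length = q.length := by rw [List.length_zip]; omega
  have h' : idx < (q.zip ans).length := by omega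
  rw [List.drop_eq_getElem_cons h']
  congr 1
  rw [List.getElem_zip]
  congr 1 <;> rw [List.getD_eq_getElem]

lemma solA_eq_solP (n : Int) (q : List (List Int)) (ans : List Int) :
    ∀ (fuel idx : Nat) (sel rej : List Int), idx ≤ q.length → q.length ≤ ans.length →
      q.length - idx < fuel →
      solA n q ans fuel sel rej idx = solP n ((q.zip ans).drop idx) sel rej := by
  intro fuel
  induction fuel with
  | zero => intro idx sel rej h1 h2 h3; omega
  | succ fuel ih =>
    intro idx sel rej hle hpre hf
    by_cases hidx : idx = q.length
    · subst hidx
      have hdrop : (q.zip ans).drop q.length = [] := by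
        apply List.drop_eq_nil_of_le; rw [List.length_zip]; omega
      rw [hdrop]
      simp only [solA, solP]
      by_cases h5 : sel.length > 5
      · simp [h5]
      · simp [h5]
    · have hlt : idx < q.length := lt_of_le_of_ne hle hidx
      rw [zip_drop_cons q ans idx hlt hpre]
      simp only [solA, solP]
      by_cases h5 : sel.length > 5
      · rw [if_pos (Or.inl h5), if_pos h5]
      · rw [if_neg (not_or.mpr ⟨h5, by omega⟩), if_neg hidx, if_neg h5]
        by_cases hm : ((PySem.Set.inter (PySem.Set.ofList (q.getD idx [])) (PySem.Set.ofList sel)).length : Int) > ans.getD idx 0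
        · rw [if_pos hm, if_pos hm]
        · rw [if_neg hm, if_neg hm]
          by_cases hn : ans.getD idx 0 - ((PySem.Set.inter (PySem.Set.ofList (q.getD idx [])) (PySem.Set.ofList sel)).length : Int) >
              (((q.getD idx []).filter (fun x => !sel.contains x && !rej.contains x)).length : Int)
          · rw [if_pos hn, if_pos hn]
          · rw [if_neg hn, if_neg hn]
            rw [PySem.List.foldl_add]
            rw [zero_add]
            apply congrArg List.sum
            apply List.map_eq_map_iff.mpr
            intro combo _
            exact ih (idx + 1) _ _ (by omega) hpre (by omega)

lemma solP_perm (n : Int) :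
    ∀ (ps : List (List Int × Int)) (sel sel' rej rej' : List Int),
      sel.Perm sel' → rej.Perm rej' → solP n ps sel rej = solP n ps sel' rej' := by
  intro ps
  induction ps with
  | nil =>
    intro sel sel' rej rej' hs hr
    simp only [solP]
    rw [hs.length_eq, hr.length_eq]
  | cons p ps ih =>
    obtain ⟨row, a⟩ := p
    intro sel sel' rej rej' hs hr
    have hsc : ∀ x : Int, sel.contains x = sel'.contains x := by
      intro x; rw [Bool.eq_iff_iff]; simp only [List.contains_iff_mem]; exact hs.mem_iff
    have hrc : ∀ x : Int, rej.contains x = rej'.contains x := by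
      intro x; rw [Bool.eq_iff_iff]; simp only [List.contains_iff_mem]; exact hr.mem_iff
    have hmem : ∀ x : Int, (PySem.Set.ofList sel).contains x = (PySem.Set.ofList sel').contains x := by
      intro x
      simp only [PySem.Set.contains, List.contains_eq_mem, PySem.Set.mem_ofList, decide_eq_decide]
      exact hs.mem_iff
    have hmatched : PySem.Set.inter (PySem.Set.ofList row) (PySem.Set.ofList sel)
        = PySem.Set.inter (PySem.Set.ofList row) (PySem.Set.ofList sel') := by
      simp only [PySem.Set.inter]
      exact List.filter_congr (fun x _ => hmem x)
    have hrem : row.filter (fun x => !sel.contains x && !rej.contains x)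
        = row.filter (fun x => !sel'.contains x && !rej'.contains x) := by
      refine List.filter_congr ?_
      intro x _
      rw [hsc x, hrc x]
    simp only [solP]
    rw [hs.length_eq, hmatched, hrem]
    split_ifs with h1 h2 h3
    · rfl
    · rfl
    · rfl
    · apply congrArg List.sum
      apply List.map_eq_map_iff.mpr
      intro combo _
      exact ih _ _ _ _ (hs.append (List.Perm.refl _)) (hr.append (List.Perm.refl _))

lemma wsum_update (f : List Int × List Int → Int) (k : List Int × List Int) (v c : Int) :
    ∀ l : List ((List Int × List Int) × Int), (l.map Prod.fst).Nodup → (k, v) ∈ l →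
      wsum f (l.map (fun p => if p.1 == k then (k, v + c) else p)) = wsum f l + c * f k := by
  intro l
  induction l with
  | nil => intro _ h; simp at h
  | cons p t ih =>
    intro hnd hmem
    have hnd' : (t.map Prod.fst).Nodup := (List.nodup_cons.mp (by simpa using hnd)).2
    have hhead : p.1 ∉ t.map Prod.fst := (List.nodup_cons.mp (by simpa using hnd)).1
    rw [List.map_cons]
    by_cases hk : p.1 = k
    · have hpv : p = (k, v) := by
        rcases List.mem_cons.mp hmem with h | h
        · exact h.symm
        · exfalso
          exact hhead (hk ▸ List.mem_map.mpr ⟨(k, v), h, rfl⟩)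
      have hrest : t.map (fun p => if p.1 == k then (k, v + c) else p) = t := by
        have : ∀ p' ∈ t, (fun p => if p.1 == k then (k, v + c) else p) p' = p' := by
          intro p' hp'
          have : p'.1 ≠ k := by
            intro he
            exact hhead (hk ▸ he ▸ List.mem_map.mpr ⟨p', hp', rfl⟩)
          simp [this]
        rw [List.map_congr_left this, List.map_id']
      rw [hrest, hpv]
      rw [if_pos (by simp)]
      rw [wsum_cons, wsum_cons]
      ring
    · rw [if_neg (by simp [hk])]
      have hmem' : (k, v) ∈ t := by
        rcases List.mem_cons.mp hmem with h | h
        · exact absurd (by rw [← h]) hk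
        · exact h
      rw [wsum_cons, wsum_cons, ih hnd' hmem']
      ring

lemma wsum_insert_add (f : List Int × List Int → Int) (d : PySem.Dict (List Int × List Int) Int)
    (hnd : d.keys.Nodup) (k : List Int × List Int) (c : Int) :
    wsum f (d.insert k (d.getD k 0 + c)).items = wsum f d.items + c * f k := by
  cases hc : d.contains k
  · rw [PySem.Dict.items_insert_of_not_contains d _ hc, PySem.Dict.getD_of_not_contains d 0 hc]
    rw [wsum_append, wsum_cons, wsum_nil]
    ring
  · have hkmem : k ∈ d.keys := (PySem.Dict.contains_iff_mem_keys d k).mp hc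
    have hex : ∃ v, (k, v) ∈ d.items := by
      have : k ∈ d.items.map Prod.fst := by
        simpa [PySem.Dict.keys] using hkmem
      obtain ⟨p, hp, he⟩ := List.mem_map.mp this
      refine ⟨p.2, ?_⟩
      rw [← he]
      simpa using hp
    obtain ⟨v, hv⟩ := hex
    have hg : d.getD k 0 = v := PySem.Dict.getD_of_mem_items d hv hnd 0
    rw [PySem.Dict.items_insert_of_contains d _ hc, hg]
    have hndk : (d.items.map Prod.fst).Nodup := by
      simpa [PySem.Dict.keys] using hnd
    exact wsum_update f k v c d.items hndk hv

lemma wsum_foldl_inserts (f : List Int × List Int → Int) (sel rej rem : List Int) (c : Int) :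
    ∀ (combos : List (List Int)) (acc : PySem.Dict (List Int × List Int) Int), acc.keys.Nodup →
      wsum f ((combos.foldl
          (fun nxt combo => nxt.insert (childKey sel rej rem combo)
            (nxt.getD (childKey sel rej rem combo) 0 + c)) acc).items)
        = wsum f acc.items + (combos.map (fun combo => c * f (childKey sel rej rem combo))).sum := by
  intro combos
  induction combos with
  | nil => intro acc _; simp
  | cons c0 t ih =>
    intro acc hnd
    rw [List.foldl_cons, List.map_cons, List.sum_cons]
    rw [ih _ (PySem.Dict.nodup_keys_insert _ _ _ hnd)]
    rw [wsum_insert_add f acc hnd (childKey sel rej rem c0) c]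
    ring

lemma nodup_keys_outerF (row : List Int) (a : Int) (acc : PySem.Dict (List Int × List Int) Int)
    (p : (List Int × List Int) × Int) (hnd : acc.keys.Nodup) : (outerF row a acc p).keys.Nodup := by
  unfold outerF
  split_ifs
  · exact hnd
  · exact hnd
  · exact hnd
  · exact PySem.Dict.nodup_keys_foldl_insert_key _
      (childKey p.1.1 p.1.2 (row.filter (fun x => !p.1.1.contains x && !p.1.2.contains x)))
      (fun nxt combo =>
        nxt.getD (childKey p.1.1 p.1.2 (row.filter (fun x => !p.1.1.contains x && !p.1.2.contains x)) combo) 0 + p.2)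
      acc hnd

lemma nodup_keys_foldl_outerF (row : List Int) (a : Int) :
    ∀ (l : List ((List Int × List Int) × Int)) (acc : PySem.Dict (List Int × List Int) Int),
      acc.keys.Nodup → (l.foldl (outerF row a) acc).keys.Nodup := by
  intro l
  induction l with
  | nil => intro acc h; exact h
  | cons p t ih =>
    intro acc hnd
    rw [List.foldl_cons]
    exact ih _ (nodup_keys_outerF row a acc p hnd)

lemma nodup_keys_stepB (row : List Int) (a : Int) (d : PySem.Dict (List Int × List Int) Int) :
    (stepB row a d).keys.Nodup := by
  rw [stepB_eq]
  exact nodup_keys_foldl_outerF row a d.items PySem.Dict.empty PySem.Dict.nodup_keys_empty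

lemma wsum_outerF (n : Int) (ps : List (List Int × Int)) (row : List Int) (a : Int)
    (acc : PySem.Dict (List Int × List Int) Int) (p : (List Int × List Int) × Int)
    (hnd : acc.keys.Nodup) :
    wsum (fun s => solP n ps s.1 s.2) (outerF row a acc p).items
      = wsum (fun s => solP n ps s.1 s.2) acc.items + p.2 * solP n ((row, a) :: ps) p.1.1 p.1.2 := by
  obtain ⟨⟨sel, rej⟩, cnt⟩ := p
  unfold outerF
  dsimp only
  simp only [solP]
  by_cases h5 : sel.length > 5
  · rw [if_pos h5, if_pos h5]; ring
  · rw [if_neg h5, if_neg h5]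
    by_cases hm : ((PySem.Set.inter (PySem.Set.ofList row) (PySem.Set.ofList sel)).length : Int) > a
    · rw [if_pos hm, if_pos hm]; ring
    · rw [if_neg hm, if_neg hm]
      by_cases hn : a - ((PySem.Set.inter (PySem.Set.ofList row) (PySem.Set.ofList sel)).length : Int) >
          ((row.filter (fun x => !sel.contains x && !rej.contains x)).length : Int)
      · rw [if_pos hn, if_pos hn]; ring
      · rw [if_neg hn, if_neg hn]
        rw [wsum_foldl_inserts (fun s => solP n ps s.1 s.2) sel rej _ cnt _ acc hnd]
        congr 1
        rw [PySem.List.sum_map_const_mul_int]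
        refine congrArg (HMul.hMul cnt) (congrArg List.sum (List.map_eq_map_iff.mpr ?_))
        intro combo _
        exact solP_perm n ps _ _ _ _ (PySem.List.sorted_perm _ _ _) (PySem.List.sorted_perm _ _ _)

lemma wsum_foldl_outerF (n : Int) (ps : List (List Int × Int)) (row : List Int) (a : Int) :
    ∀ (l : List ((List Int × List Int) × Int)) (acc : PySem.Dict (List Int × List Int) Int),
      acc.keys.Nodup →
      wsum (fun s => solP n ps s.1 s.2) ((l.foldl (outerF row a) acc).items)
        = wsum (fun s => solP n ps s.1 s.2) acc.items
          + wsum (fun s => solP n ((row, a) :: ps) s.1 s.2) l := by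
  intro l
  induction l with
  | nil => intro acc _; rw [List.foldl_nil, wsum_nil]; ring
  | cons p t ih =>
    intro acc hnd
    rw [List.foldl_cons, wsum_cons]
    rw [ih _ (nodup_keys_outerF row a acc p hnd)]
    rw [wsum_outerF n ps row a acc p hnd]
    ring

lemma wsum_stepB (n : Int) (row : List Int) (a : Int) (ps : List (List Int × Int))
    (d : PySem.Dict (List Int × List Int) Int) :
    wsum (fun s => solP n ps s.1 s.2) (stepB row a d).items
      = wsum (fun s => solP n ((row, a) :: ps) s.1 s.2) d.items := by
  rw [stepB_eq]
  rw [wsum_foldl_outerF n ps row a d.items PySem.Dict.empty PySem.Dict.nodup_keys_empty]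
  simp [wsum, PySem.Dict.empty]

lemma wsum_run (n : Int) :
    ∀ (pairs : List (List Int × Int)) (d : PySem.Dict (List Int × List Int) Int), d.keys.Nodup →
      wsum (fun s => solP n [] s.1 s.2) ((pairs.foldl (fun st p => stepB p.1 p.2 st) d).items)
        = wsum (fun s => solP n pairs s.1 s.2) d.items := by
  intro pairs
  induction pairs with
  | nil => intro d _; rfl
  | cons p t ih =>
    intro d hnd
    rw [List.foldl_cons]
    rw [ih _ (nodup_keys_stepB p.1 p.2 d)]
    rw [wsum_stepB n p.1 p.2 t d]

lemma final_fold (n : Int) (l : List ((List Int × List Int) × Int)) :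
    l.foldl
        (fun acc p =>
          if p.1.1.length ≤ 5 then
            acc + p.2 * comb_cnt (n - p.1.1.length - p.1.2.length) (5 - p.1.1.length)
          else acc) 0
      = wsum (fun s => solP n [] s.1 s.2) l := by
  rw [PySem.List.foldl_congr_mem l _
    (fun acc p => acc + p.2 * solP n [] p.1.1 p.1.2) 0 ?_]
  · rw [PySem.List.foldl_add]
    simp [wsum]
  · intro acc p _
    by_cases h : p.1.1.length ≤ 5
    · rw [if_pos h]
      simp only [solP]
      rw [if_neg (by omega : ¬ p.1.1.length > 5)]
      rfl
    · rw [if_neg h]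
      simp only [solP]
      rw [if_pos (by omega : p.1.1.length > 5)]
      ring

lemma solution_alt_eq_solP (n : Int) (q : List (List Int)) (ans : List Int) :
    solution_alt n q ans = solP n (q.zip ans) [] [] := by
  unfold solution_alt
  dsimp only
  rw [final_fold n]
  rw [wsum_run n (q.zip ans) _
    (PySem.Dict.nodup_keys_insert _ _ _ PySem.Dict.nodup_keys_empty)]
  have hitems : (PySem.Dict.empty.insert (([], []) : List Int × List Int) (1 : Int)).items
      = [(([], []), 1)] := by decide
  rw [hitems, wsum_cons, wsum_nil]
  ring

-- ===== VERDICT (by name: the statement is the Claim_ definition above) =====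
theorem solution_spec : Claim_equal_solution := by
  intro n q ans _hdom hpre
  unfold Spec_solution
  have hA := solA_eq_solP n q ans (q.length + 1) 0 [] [] (Nat.zero_le _) hpre (by omega)
  rw [solution, hA, List.drop_zero, solution_alt_eq_solP]
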